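-- pv_equiv track=rewrite | github.com/Eko-Refugium/DNAbyte | dnabyte/encoding/no_homopolymer/encode.py | binary_to_dna_custom
-- ===== SOURCE A (Python) =====
-- def binary_to_dna_custom(binary_sequence):
--     """
--     Translates a binary string to a DNA string.
--
--     For every even position, a 0 and 1 are translated to T and G, respectively.
--     For every odd position, a 0 and 1 are translated to C and A, respectively.
--     """
--     dna_sequence = []
--     for i, bit in enumerate(binary_sequence):
--         if i % 2 == 0:  # Even position
--             if bit == '0':
--                 dna_sequence.append('T')
--             else:
--                 dna_sequence.append('G')
--         else:  # Odd position
--             if bit == '0':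
--                 dna_sequence.append('C')
--             else:
--                 dna_sequence.append('A')
--     return ''.join(dna_sequence)
-- ===== SOURCE B (Python) =====
-- def binary_to_dna_custom(binary_sequence):
--     """Slice-based rewrite: map even/odd position slices uniformly, then interleave."""
--     evens = ['T' if c == '0' else 'G' for c in binary_sequence[0::2]]
--     odds = ['C' if c == '0' else 'A' for c in binary_sequence[1::2]]
--     interleaved = []
--     for e, o in zip(evens, odds):
--         interleaved.append(e)
--         interleaved.append(o)
--     interleaved.extend(evens[len(odds):])
--     return ''.join(interleaved)
-- ===== Notes on version B (the rewrite author's own statement) =====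
-- stated objective: alternative
-- what changed: Replaces the single indexed loop with per-parity branching by slicing the string into even- and odd-position characters, mapping each slice with one uniform rule, and interleaving the two mapped slices (appending the leftover even character for odd lengths).
import Mathlib
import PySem

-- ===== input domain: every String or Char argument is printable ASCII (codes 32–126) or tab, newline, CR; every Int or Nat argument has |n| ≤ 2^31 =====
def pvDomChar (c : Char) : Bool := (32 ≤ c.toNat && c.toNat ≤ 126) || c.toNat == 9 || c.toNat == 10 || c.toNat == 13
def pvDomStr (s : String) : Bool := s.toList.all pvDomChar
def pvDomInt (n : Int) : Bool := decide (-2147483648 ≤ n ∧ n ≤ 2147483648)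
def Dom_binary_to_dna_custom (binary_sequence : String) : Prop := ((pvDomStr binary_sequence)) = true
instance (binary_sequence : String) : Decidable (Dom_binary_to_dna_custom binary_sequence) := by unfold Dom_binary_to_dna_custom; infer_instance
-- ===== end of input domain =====

-- ===== PORT A =====
-- B interleaves uniformly-mapped even/odd slices instead of A's indexed per-character loop (alternative decomposition).
-- loop 'for i, bit in enumerate(...)' appending one char per bit, ported as structural recursion carrying the index i
def pvGoA : Nat → List Char → List Char
  | _, [] => []
  | i, c :: t =>
    (if i % 2 == 0 then (if c == '0' then 'T' else 'G')
     else (if c == '0' then 'C' else 'A')) :: pvGoA (i + 1) t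

def binary_to_dna_custom (binary_sequence : String) : String :=
  String.mk (pvGoA 0 binary_sequence.toList)

-- ===== PORT B =====
-- exact port of Python's extended slice xs[0::2] (every second element starting at 0)
def pvEveryOther : List Char → List Char
  | [] => []
  | [a] => [a]
  | a :: _ :: t => a :: pvEveryOther t

-- the 'for e, o in zip(evens, odds)' loop appending e then o
def pvZipInterleave : List Char → List Char → List Char
  | e :: es, o :: os => e :: o :: pvZipInterleave es os
  | _, _ => []

def binary_to_dna_custom_alt (binary_sequence : String) : String :=
  let l := binary_sequence.toList
  let evens := (pvEveryOther l).map (fun c => if c == '0' then 'T' else 'G')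
  let odds := (pvEveryOther l.tail).map (fun c => if c == '0' then 'C' else 'A')
  String.mk (pvZipInterleave evens odds ++ evens.drop odds.length)

-- ===== PRECONDITION & SPEC =====
def Spec_binary_to_dna_custom (binary_sequence : String) (out : String) : Prop := out = binary_to_dna_custom_alt binary_sequence
instance (binary_sequence : String) (out : String) : Decidable (Spec_binary_to_dna_custom binary_sequence out) := by unfold Spec_binary_to_dna_custom; infer_instance

-- ===== CLAIM (what is proved, stated in full; the proofs are below) =====
def Claim_equal_binary_to_dna_custom : Prop := ∀ (binary_sequence : String), Dom_binary_to_dna_custom binary_sequence → Spec_binary_to_dna_custom binary_sequence (binary_to_dna_custom binary_sequence)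

-- ===== LEMMAS AND PROOFS =====

theorem pvGoA_parity (l : List Char) (i : Nat) : pvGoA (i + 2) l = pvGoA i l := by
  induction l generalizing i with
  | nil => rfl
  | cons c t ih =>
      simp only [pvGoA, ih]
      have : (i + 2) % 2 = i % 2 := by omega
      rw [this]

theorem pvEveryOther_cons (x : Char) (xs : List Char) :
    pvEveryOther (x :: xs) = x :: pvEveryOther xs.tail := by
  cases xs <;> rfl

theorem pvKey : ∀ (l : List Char),
    pvGoA 0 l =
      pvZipInterleave ((pvEveryOther l).map (fun c => if c == '0' then 'T' else 'G'))
          ((pvEveryOther l.tail).map (fun c => if c == '0' then 'C' else 'A')) ++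
        ((pvEveryOther l).map (fun c => if c == '0' then 'T' else 'G')).drop
          ((pvEveryOther l.tail).map (fun c => if c == '0' then 'C' else 'A')).length
  | [] => rfl
  | [a] => by simp [pvGoA, pvEveryOther, pvZipInterleave]
  | a :: b :: t => by
      have ih := pvKey t
      have h2 : pvGoA 2 t = pvGoA 0 t := pvGoA_parity t 0
      simp only [pvGoA, pvEveryOther_cons, List.tail_cons, List.map_cons, pvZipInterleave,
        List.length_cons, List.drop_succ_cons, Nat.reduceAdd, Nat.reduceMod, Nat.reduceBEq,
        reduceIte]
      rw [h2, ih]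
      simp

-- ===== VERDICT (by name: the statement is the Claim_ definition above) =====
theorem binary_to_dna_custom_spec : Claim_equal_binary_to_dna_custom := by
  intro s _
  show _ = _
  simp only [binary_to_dna_custom, binary_to_dna_custom_alt]
  rw [pvKey]
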